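-- pv_equiv track=rewrite | github.com/haolunc/ARC-RL | reference_solutions/solutions/3906de3d.py | transform
-- ===== SOURCE A (Python) =====
-- def transform(grid):
--
--     h = len(grid)
--     w = len(grid[0]) if h else 0
--
--     out = [row[:] for row in grid]
--
--     for c in range(w):
--
--         two_cnt = sum(1 for r in range(h) if grid[r][c] == 2)
--
--         for r in range(h):
--             if grid[r][c] == 2:
--                 out[r][c] = 0
--
--         top_one = -1
--         for r in range(h):
--             if grid[r][c] == 1:
--                 top_one = r
--                 break
--
--         r = top_one + 1
--         while two_cnt > 0 and r < h:
--             if out[r][c] == 0: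
--                 out[r][c] = 2
--                 two_cnt -= 1
--             r += 1
--
--     return out
-- ===== SOURCE B (Python) =====
-- def transform(grid):
--     if not grid:
--         return []
--     w = len(grid[0])
--     # one streaming row-major pass, driven by per-column precomputed budget/wait
--     budget = [sum(row[c] == 2 for row in grid) for c in range(w)]
--     wait = [any(row[c] == 1 for row in grid) for c in range(w)]
--     out = []
--     for row in grid:
--         new = list(row)
--         for c in range(w):
--             v = row[c]
--             if not wait[c] and v in (0, 2):
--                 if budget[c] > 0:
--                     new[c] = 2
--                     budget[c] -= 1
--                 else:
--                     new[c] = 0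
--             else:
--                 if v == 2:
--                     new[c] = 0
--                 if v == 1:
--                     wait[c] = False
--         out.append(new)
--     return out
-- ===== Notes on version B (the rewrite author's own statement) =====
-- stated objective: alternative
-- what changed: B traverses the grid row-major in a single streaming building pass: per-column 2-counts (budget) and has-a-1 flags (wait) are precomputed once, then each row is emitted in order while the per-column state (remaining budget, waiting-for-first-1) is threaded across rows, instead of A's column-by-column sequence of count / clear / find-top-1 / while-refill passes over a mutated grid copy.
import Mathlib
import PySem

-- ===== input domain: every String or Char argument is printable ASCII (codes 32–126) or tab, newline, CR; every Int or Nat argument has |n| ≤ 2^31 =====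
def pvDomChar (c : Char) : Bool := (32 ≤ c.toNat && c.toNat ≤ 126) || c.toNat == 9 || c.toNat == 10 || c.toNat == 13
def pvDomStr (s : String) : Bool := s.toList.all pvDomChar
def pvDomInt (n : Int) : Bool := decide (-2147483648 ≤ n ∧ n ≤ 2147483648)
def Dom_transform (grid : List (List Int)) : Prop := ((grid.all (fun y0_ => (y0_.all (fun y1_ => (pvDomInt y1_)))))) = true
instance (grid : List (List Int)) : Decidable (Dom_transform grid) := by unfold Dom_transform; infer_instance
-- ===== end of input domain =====

-- B replaces A's column-by-column multi-pass mutation with one streaming row-major building pass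
-- driven by per-column precomputed budgets/waits (objective: alternative decomposition, same cost).


-- ===== PORT A =====
-- grid[r][c] (always in range where A reads it under Pre_transform; 0 is an unreachable default)
def pvCell (g : List (List Int)) (r c : Nat) : Int := (g.getD r []).getD c 0

-- out[r][c] = v
def pvSetCell (g : List (List Int)) (r c : Nat) (v : Int) : List (List Int) :=
  g.modify r (fun row => row.set c v)

-- the loop 'for r in range(h): if grid[r][c] == 1: top_one = r; break'
def pvTopOne (grid : List (List Int)) (c : Nat) : List Nat → Int
  | [] => -1
  | r :: rs => if pvCell grid r c = 1 then (r : Int) else pvTopOne grid c rs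

-- the body of A's 'for c in range(w)' loop; the while loop is a guarded fold (once two_cnt = 0
-- further iterations change nothing)
def pvColStep (grid : List (List Int)) (out : List (List Int)) (c : Nat) : List (List Int) :=
  let h := grid.length
  let two_cnt : Int :=
    (((List.range h).filter (fun r => decide (pvCell grid r c = 2))).map (fun _ => (1 : Int))).sum
  let out2 := (List.range h).foldl (fun o r => if pvCell grid r c = 2 then pvSetCell o r c 0 else o) out
  let top_one := pvTopOne grid c (List.range h)
  ((PySem.List.pyRange (top_one + 1) (h : Int) 1).foldl
      (fun st r => if 0 < st.2 ∧ pvCell st.1 r.toNat c = 0 then (pvSetCell st.1 r.toNat c 2, st.2 - 1) else st)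
      (out2, two_cnt)).1

def transform (grid : List (List Int)) : List (List Int) :=
  let h := grid.length
  let w := if h ≠ 0 then (grid.getD 0 []).length else 0
  let out := grid.map (fun row => row)
  (List.range w).foldl (pvColStep grid) out

-- ===== PORT B =====
-- one cell of B's inner 'for c in range(w)' body, acting on the (budget, wait, new) state
def pvInner (w : Nat) (row : List Int) (budget : List Int) (wait : List Bool) :
    List Int × List Bool × List Int :=
  (List.range w).foldl
    (fun (s : List Int × List Bool × List Int) c =>
      let v := row.getD c 0
      if s.2.1.getD c false = false ∧ (v = 0 ∨ v = 2) then
        if 0 < s.1.getD c 0 then (s.1.set c (s.1.getD c 0 - 1), s.2.1, s.2.2.set c 2)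
        else (s.1, s.2.1, s.2.2.set c 0)
      else
        (s.1, (if v = 1 then s.2.1.set c false else s.2.1),
          (if v = 2 then s.2.2.set c 0 else s.2.2)))
    (budget, wait, row.map id)

-- B's 'for row in grid' body: run the inner pass, append the finished row
def pvRowStep (w : Nat) (st : List Int × List Bool × List (List Int)) (row : List Int) :
    List Int × List Bool × List (List Int) :=
  let s := pvInner w row st.1 st.2.1
  (s.1, s.2.1, st.2.2 ++ [s.2.2])

def transform_alt (grid : List (List Int)) : List (List Int) :=
  if grid.length = 0 then []
  else
    let w := (grid.getD 0 []).length
    let budget : List Int :=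
      (List.range w).map (fun c => (grid.map (fun row => if row.getD c 0 = 2 then (1 : Int) else 0)).sum)
    let wait : List Bool :=
      (List.range w).map (fun c => grid.any (fun row => decide (row.getD c 0 = 1)))
    (grid.foldl (pvRowStep w) (budget, wait, [])).2.2

-- ===== PRECONDITION & SPEC =====
-- Pre_ excludes exactly the grids with a row shorter than the first row, on which A raises IndexError.
def Pre_transform (grid : List (List Int)) : Prop :=
  ∀ row ∈ grid, (grid.getD 0 []).length ≤ row.length
instance (grid : List (List Int)) : Decidable (Pre_transform grid) := by
  unfold Pre_transform; infer_instance
def pvWitness_transform : List (List Int) := [[2, 1], [0, 0], [2, 0]]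
def Spec_transform (grid : List (List Int)) (out : List (List Int)) : Prop := out = transform_alt grid
instance (grid : List (List Int)) (out : List (List Int)) : Decidable (Spec_transform grid out) := by
  unfold Spec_transform; infer_instance

-- ===== CLAIM (what is proved, stated in full; the proofs are below) =====
def Claim_equal_transform : Prop :=
  ∀ (grid : List (List Int)), Dom_transform grid → Pre_transform grid → Spec_transform grid (transform grid)

-- ===== LEMMAS AND PROOFS =====

-- ---------- generic getD/set facts ----------
theorem getD_set_ne {α : Type} (l : List α) {i j : Nat} (h : i ≠ j) (v d : α) :
    (l.set i v).getD j d = l.getD j d := by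
  rw [List.getD_eq_getElem?_getD, List.getElem?_set_ne h, ← List.getD_eq_getElem?_getD]

theorem getD_set_self {α : Type} (l : List α) {i : Nat} (h : i < l.length) (v d : α) :
    (l.set i v).getD i d = v := by
  rw [List.getD_eq_getElem?_getD, List.getElem?_set_self h]; rfl

-- ---------- shape / column machinery ----------
-- g has grid's shape: same number of rows, each row of the same length as grid's
def Shp (grid g : List (List Int)) : Prop :=
  g.length = grid.length ∧ ∀ i, (g.getD i []).length = (grid.getD i []).length

-- column c of g, as a list of length g.length
def colP (g : List (List Int)) (c : Nat) : List Int :=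
  (List.range g.length).map (fun r => pvCell g r c)

theorem length_colP (g : List (List Int)) (c : Nat) : (colP g c).length = g.length := by
  simp [colP]

theorem cell_colP (g : List (List Int)) (c r : Nat) : pvCell g r c = (colP g c).getD r 0 := by
  by_cases hr : r < g.length
  · simp [colP, List.getD_eq_getElem?_getD, List.getElem?_map, List.getElem?_range hr]
  · have h1 : g[r]? = none := List.getElem?_eq_none (by omega)
    have h3 : (List.range g.length)[r]? = none := List.getElem?_eq_none (by simp; omega)
    simp [colP, pvCell, List.getD_eq_getElem?_getD, h1, h3]

theorem colP_getElem {g : List (List Int)} {c j : Nat} (hj : j < (colP g c).length) :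
    (colP g c)[j] = pvCell g j c := by
  simp [colP] at hj ⊢

theorem shp_setCell {grid g : List (List Int)} (hg : Shp grid g) (r c : Nat) (v : Int) :
    Shp grid (pvSetCell g r c v) := by
  refine ⟨by simp [pvSetCell, hg.1], fun i => ?_⟩
  have key : ((pvSetCell g r c v).getD i []).length = (g.getD i []).length := by
    simp only [pvSetCell, List.getD_eq_getElem?_getD, List.getElem?_modify]
    cases g[i]? with
    | none => simp
    | some row => split <;> simp
  rw [key]; exact hg.2 i

theorem cell_setCell_self {g : List (List Int)} {r c : Nat} (hr : r < g.length)
    (hc : c < (g.getD r []).length) (v : Int) : pvCell (pvSetCell g r c v) r c = v := by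
  have hgr : g.getD r [] = g[r] := by simp [List.getD_eq_getElem?_getD, List.getElem?_eq_getElem hr]
  have hc' : c < g[r].length := by rwa [hgr] at hc
  simp only [pvCell, pvSetCell, List.getD_eq_getElem?_getD, List.getElem?_modify,
    List.getElem?_eq_getElem hr]
  simp [List.getElem?_set_self hc']

theorem cell_setCell_ne {g : List (List Int)} {r c r' c' : Nat} (hne : r' ≠ r ∨ c' ≠ c) (v : Int) :
    pvCell (pvSetCell g r c v) r' c' = pvCell g r' c' := by
  by_cases hr' : r = r'
  · subst hr'
    have hcc : c' ≠ c := by tauto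
    simp only [pvCell, pvSetCell, List.getD_eq_getElem?_getD, List.getElem?_modify]
    cases g[r]? with
    | none => simp
    | some row => simp [List.getElem?_set_ne (by omega : c ≠ c')]
  · simp only [pvCell, pvSetCell, List.getD_eq_getElem?_getD, List.getElem?_modify]
    cases g[r']? with
    | none => simp
    | some row => simp [hr']

theorem colP_setCell {g : List (List Int)} {r c : Nat} (hr : r < g.length)
    (hc : c < (g.getD r []).length) (v : Int) :
    colP (pvSetCell g r c v) c = (colP g c).set r v := by
  apply List.ext_getElem
  · simp [colP, pvSetCell]
  · intro j h1 h2
    have hj : j < g.length := by simpa [colP, pvSetCell] using h1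
    rw [colP_getElem h1, List.getElem_set]
    by_cases hrj : r = j
    · subst hrj; simp [cell_setCell_self hr hc v]
    · rw [if_neg hrj, cell_setCell_ne (Or.inl (by omega)) v, ← colP_getElem (by simpa using h2)]

theorem colP_setCell_ne {c c' : Nat} (hne : c' ≠ c) (g : List (List Int)) (r : Nat) (v : Int) :
    colP (pvSetCell g r c v) c' = colP g c' := by
  apply List.ext_getElem
  · simp [colP, pvSetCell]
  · intro j h1 h2
    rw [colP_getElem h1, colP_getElem h2, cell_setCell_ne (Or.inr hne) v]

-- ---------- pure per-column models ----------
-- 2 ↦ 0, everything else unchanged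
def zr (v : Int) : Int := if v = 2 then 0 else v

-- set the first t zeros of the list to 2
def fillF : List Int → Int → List Int
  | [], _ => []
  | v :: vs, t => if v = 0 ∧ 0 < t then 2 :: fillF vs (t - 1) else v :: fillF vs t

-- scalar step of B's inner body on one cell: (budget, wait) × output value
def cstep (v : Int) (b : Int) (w : Bool) : Int × Bool × Int :=
  if w = false ∧ (v = 0 ∨ v = 2) then
    (if 0 < b then (b - 1, w, 2) else (b, w, 0))
  else (b, (if v = 1 then false else w), (if v = 2 then 0 else v))

-- B's streaming pass restricted to one column
def scanS : List Int → Int → Bool → List Int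
  | [], _, _ => []
  | v :: vs, b, w => (cstep v b w).2.2 :: scanS vs (cstep v b w).1 (cstep v b w).2.1

-- index of the first 1 (-1 if none), on a value list
def topC : List Int → Int
  | [] => -1
  | v :: vs => if v = 1 then 0 else if topC vs = -1 then -1 else topC vs + 1

-- the common pure column specification
def specCol (col : List Int) : List Int :=
  (col.map zr).take ((topC col + 1).toNat) ++
    fillF ((col.map zr).drop ((topC col + 1).toNat)) ((col.countP (fun v => decide (v = 2)) : Nat) : Int)

-- imperative position-list fill, the model of A's while loop
def fillCol : List Int → List Nat → Int → List Int
  | nc, [], _ => nc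
  | nc, r :: rs, t => if 0 < t ∧ nc.getD r 0 = 0 then fillCol (nc.set r 2) rs (t - 1) else fillCol nc rs t

-- ---------- A-side fold characterisations ----------
theorem wf_len (p : Nat → Prop) [DecidablePred p] (v : Int) :
    ∀ (rs : List Nat) (nc : List Int),
    (rs.foldl (fun nc r => if p r then nc.set r v else nc) nc).length = nc.length := by
  intro rs
  induction rs with
  | nil => intro nc; rfl
  | cons r rs ih => intro nc; rw [List.foldl_cons, ih]; split <;> simp

theorem wf_getD (p : Nat → Prop) [DecidablePred p] (v : Int) :
    ∀ (rs : List Nat) (nc : List Int) (j : Nat), j < nc.length →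
    (rs.foldl (fun nc r => if p r then nc.set r v else nc) nc).getD j 0 =
      if j ∈ rs ∧ p j then v else nc.getD j 0 := by
  intro rs
  induction rs with
  | nil => intro nc j hj; simp
  | cons r rs ih =>
    intro nc j hj
    rw [List.foldl_cons]
    by_cases hp : p r
    · rw [if_pos hp, ih (nc.set r v) j (by simpa using hj)]
      by_cases hjr : j = r
      · subst hjr
        simp [hp, List.getD_eq_getElem?_getD, List.getElem?_set_self hj]
      · rw [List.getD_eq_getElem?_getD, List.getElem?_set_ne (by omega : r ≠ j),
          ← List.getD_eq_getElem?_getD]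
        simp [hjr]
    · rw [if_neg hp, ih nc j hj]
      by_cases hjr : j = r
      · subst hjr; simp [hp]
      · simp [hjr]

theorem zero_pure (col : List Int) :
    (List.range col.length).foldl (fun nc r => if col.getD r 0 = 2 then nc.set r 0 else nc) col =
      col.map zr := by
  apply List.ext_getElem
  · rw [wf_len (fun r => col.getD r 0 = 2) 0]; simp
  · intro j h1 h2
    have hj : j < col.length := by
      rw [wf_len (fun r => col.getD r 0 = 2) 0] at h1; exact h1
    rw [← List.getD_eq_getElem _ 0 h1, wf_getD (fun r => col.getD r 0 = 2) 0 _ col j hj]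
    simp only [List.mem_range, List.getElem_map]
    rw [List.getD_eq_getElem col 0 hj]
    by_cases hcj : col[j] = 2
    · simp [zr, hj, hcj]
    · simp [zr, hj, hcj]

theorem zero_pure' (col : List Int) (n : Nat) (hn : col.length = n) :
    (List.range n).foldl (fun nc r => if col.getD r 0 = 2 then nc.set r 0 else nc) col =
      col.map zr := by
  subst hn; exact zero_pure col

theorem zero_fold (grid : List (List Int)) (c w : Nat) (hcw : c < w)
    (hwid : ∀ r, r < grid.length → w ≤ (grid.getD r []).length) :
    ∀ (rs : List Nat) (g : List (List Int)), Shp grid g → (∀ r ∈ rs, r < grid.length) →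
    Shp grid (rs.foldl (fun o r => if pvCell grid r c = 2 then pvSetCell o r c 0 else o) g)
    ∧ (∀ c', c' ≠ c →
        colP (rs.foldl (fun o r => if pvCell grid r c = 2 then pvSetCell o r c 0 else o) g) c' = colP g c')
    ∧ colP (rs.foldl (fun o r => if pvCell grid r c = 2 then pvSetCell o r c 0 else o) g) c =
        rs.foldl (fun nc r => if pvCell grid r c = 2 then nc.set r 0 else nc) (colP g c) := by
  intro rs
  induction rs with
  | nil => intro g hg _; exact ⟨hg, fun _ _ => rfl, rfl⟩
  | cons r rs ih =>
    intro g hg hb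
    have hrh : r < grid.length := hb r (List.mem_cons_self ..)
    have hrg : r < g.length := by rw [hg.1]; exact hrh
    have hcg : c < (g.getD r []).length := by
      rw [hg.2 r]; exact lt_of_lt_of_le hcw (hwid r hrh)
    simp only [List.foldl_cons]
    by_cases hcell : pvCell grid r c = 2
    · rw [if_pos hcell, if_pos hcell]
      obtain ⟨R, O, C⟩ := ih (pvSetCell g r c 0) (shp_setCell hg r c 0) (fun r' hr' => hb r' (List.mem_cons_of_mem _ hr'))
      exact ⟨R, fun c' hc' => by rw [O c' hc', colP_setCell_ne hc'],
        by rw [C, colP_setCell hrg hcg 0]⟩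
    · rw [if_neg hcell, if_neg hcell]
      exact ih g hg (fun r' hr' => hb r' (List.mem_cons_of_mem _ hr'))

theorem fill_fold (grid : List (List Int)) (c w : Nat) (hcw : c < w)
    (hwid : ∀ r, r < grid.length → w ≤ (grid.getD r []).length) :
    ∀ (rs : List Nat) (g : List (List Int)) (t : Int), Shp grid g → (∀ r ∈ rs, r < grid.length) →
    Shp grid (rs.foldl (fun st r => if 0 < st.2 ∧ pvCell st.1 r c = 0 then (pvSetCell st.1 r c 2, st.2 - 1) else st) (g, t)).1
    ∧ (∀ c', c' ≠ c →
        colP (rs.foldl (fun st r => if 0 < st.2 ∧ pvCell st.1 r c = 0 then (pvSetCell st.1 r c 2, st.2 - 1) else st) (g, t)).1 c' = colP g c')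
    ∧ colP (rs.foldl (fun st r => if 0 < st.2 ∧ pvCell st.1 r c = 0 then (pvSetCell st.1 r c 2, st.2 - 1) else st) (g, t)).1 c =
        fillCol (colP g c) rs t := by
  intro rs
  induction rs with
  | nil => intro g t hg _; exact ⟨hg, fun _ _ => rfl, rfl⟩
  | cons r rs ih =>
    intro g t hg hb
    have hrh : r < grid.length := hb r (List.mem_cons_self ..)
    have hrg : r < g.length := by rw [hg.1]; exact hrh
    have hcg : c < (g.getD r []).length := by
      rw [hg.2 r]; exact lt_of_lt_of_le hcw (hwid r hrh)
    have hbb : ∀ r' ∈ rs, r' < grid.length := fun r' hr' => hb r' (List.mem_cons_of_mem _ hr')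
    simp only [List.foldl_cons, fillCol]
    rw [← cell_colP g c r]
    by_cases hcond : 0 < t ∧ pvCell g r c = 0
    · rw [if_pos hcond, if_pos hcond]
      obtain ⟨R, O, C⟩ := ih (pvSetCell g r c 2) (t - 1) (shp_setCell hg r c 2) hbb
      exact ⟨R, fun c' hc' => by rw [O c' hc', colP_setCell_ne hc'],
        by rw [C, colP_setCell hrg hcg 2]⟩
    · rw [if_neg hcond, if_neg hcond]
      exact ih g t hg hbb

-- ---------- top-one machinery ----------
theorem top_bound (grid : List (List Int)) (c : Nat) : ∀ (rs : List Nat) (n : Int),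
    (∀ r ∈ rs, (r : Int) < n) → -1 ≤ pvTopOne grid c rs ∧ pvTopOne grid c rs < n ∨ pvTopOne grid c rs = -1 := by
  intro rs n hb
  induction rs with
  | nil => right; rfl
  | cons r t ih =>
    simp only [pvTopOne]
    by_cases hc1 : pvCell grid r c = 1
    · rw [if_pos hc1]; left; exact ⟨by omega, hb r (List.mem_cons_self ..)⟩
    · rw [if_neg hc1]; exact ih (fun r' hr' => hb r' (List.mem_cons_of_mem _ hr'))

theorem topC_ge : ∀ (xs : List Int), -1 ≤ topC xs := by
  intro xs
  induction xs with
  | nil => simp [topC]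
  | cons v vs ih => simp only [topC]; split_ifs <;> omega

theorem topC_neg_iff : ∀ (xs : List Int), topC xs = -1 ↔ 1 ∉ xs := by
  intro xs
  induction xs with
  | nil => simp [topC]
  | cons v vs ih =>
    simp only [topC, List.mem_cons]
    have hge := topC_ge vs
    by_cases hv : v = 1
    · simp [hv]
    · rw [if_neg hv]
      by_cases ht : topC vs = -1
      · rw [if_pos ht]
        constructor
        · intro _
          push Not
          exact ⟨fun h => hv h.symm, ih.1 ht⟩
        · intro _; rfl
      · rw [if_neg ht]
        constructor
        · intro h; omega
        · intro hno
          push Not at hno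
          exact absurd (ih.2 hno.2) ht

-- pvTopOne over range' k m, read through the value list
theorem topC_range' (grid : List (List Int)) (c : Nat) : ∀ (m k : Nat),
    pvTopOne grid c (List.range' k m) =
      (if topC ((List.range' k m).map (fun r => pvCell grid r c)) = -1 then -1
       else (k : Int) + topC ((List.range' k m).map (fun r => pvCell grid r c))) := by
  intro m
  induction m with
  | zero => intro k; simp [pvTopOne, topC]
  | succ m ih =>
    intro k
    rw [List.range'_succ]
    simp only [List.map_cons, pvTopOne, topC]
    by_cases h1 : pvCell grid k c = 1
    · rw [if_pos h1, if_pos h1]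
      simp
    · rw [if_neg h1, if_neg h1, ih (k + 1)]
      have hge := topC_ge ((List.range' (k+1) m).map (fun r => pvCell grid r c))
      by_cases ht : topC ((List.range' (k+1) m).map (fun r => pvCell grid r c)) = -1
      · simp [ht]
      · rw [if_neg ht, if_neg (by omega), if_neg ht]
        push_cast
        omega

theorem top_eq_topC (grid : List (List Int)) (c : Nat) :
    pvTopOne grid c (List.range grid.length) = topC (colP grid c) := by
  rw [List.range_eq_range', topC_range' grid c grid.length 0]
  have : (List.range' 0 grid.length).map (fun r => pvCell grid r c) = colP grid c := by
    rw [colP, List.range_eq_range']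
  rw [this]
  have := topC_ge (colP grid c)
  split_ifs with h
  · omega
  · simp

-- ---------- fillCol on a contiguous position range = take ++ fillF ∘ drop ----------
theorem fillCol_range : ∀ (m : Nat) (nc : List Int) (k : Nat) (t : Int), k + m = nc.length →
    fillCol nc ((List.range m).map (fun i => k + i)) t = nc.take k ++ fillF (nc.drop k) t := by
  intro m
  induction m with
  | zero =>
    intro nc k t hk
    rw [List.take_of_length_le (by omega), List.drop_of_length_le (by omega)]
    simp [fillCol, fillF]
  | succ m ih =>
    intro nc k t hk
    have hkl : k < nc.length := by omega
    rw [List.range_succ_eq_map]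
    simp only [List.map_cons, List.map_map]
    have hcomp : ((List.range m).map ((fun i => k + i) ∘ Nat.succ)) =
        (List.range m).map (fun i => (k + 1) + i) := by
      apply List.map_congr_left
      intro x _
      simp [Function.comp]
      omega
    rw [hcomp]
    have hdrop : nc.drop k = nc[k] :: nc.drop (k + 1) := List.drop_eq_getElem_cons hkl
    have hgetD : nc.getD k 0 = nc[k] := List.getD_eq_getElem nc 0 hkl
    simp only [fillCol, Nat.add_zero, hgetD]
    by_cases hcond : 0 < t ∧ nc[k] = 0
    · rw [if_pos hcond, ih (nc.set k 2) (k + 1) (t - 1) (by simp; omega)]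
      have htake : (nc.set k 2).take (k + 1) = nc.take k ++ [2] := by
        rw [List.set_eq_take_append_cons_drop, if_pos hkl, List.take_append]
        have hl : (nc.take k).length = k := List.length_take_of_le (by omega)
        rw [hl]
        simp
      have hdrop2 : (nc.set k 2).drop (k + 1) = nc.drop (k + 1) := by
        rw [List.set_eq_take_append_cons_drop, if_pos hkl, List.drop_append]
        have hl : (nc.take k).length = k := List.length_take_of_le (by omega)
        rw [hl]
        simp
      rw [htake, hdrop2, hdrop]
      simp only [fillF]
      rw [if_pos ⟨hcond.2, hcond.1⟩]
      simp
    · rw [if_neg hcond, ih nc (k + 1) t (by omega), hdrop]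
      simp only [fillF]
      rw [if_neg (by tauto)]
      have htk : nc.take (k + 1) = nc.take k ++ [nc[k]] := by
        rw [List.take_add_one, List.getElem?_eq_getElem hkl]
        rfl
      rw [htk, List.append_assoc]
      rfl

-- ---------- B's scan vs the pure specification ----------
theorem zr_eq_zero_iff (v : Int) : zr v = 0 ↔ v = 0 ∨ v = 2 := by
  unfold zr; split_ifs with h <;> simp [h]

theorem scanS_false : ∀ (xs : List Int) (b : Int), scanS xs b false = fillF (xs.map zr) b := by
  intro xs
  induction xs with
  | nil => intro b; simp [scanS, fillF]
  | cons v vs ih =>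
    intro b
    have hstep : scanS (v :: vs) b false =
        (cstep v b false).2.2 :: scanS vs (cstep v b false).1 (cstep v b false).2.1 := rfl
    by_cases hv : v = 0 ∨ v = 2
    · have hz : zr v = 0 := (zr_eq_zero_iff v).2 hv
      by_cases hb : 0 < b
      · have hc : cstep v b false = (b - 1, false, 2) := by
          unfold cstep
          rw [if_pos ⟨rfl, hv⟩, if_pos hb]
        rw [hstep, hc, ih]
        simp [fillF, hz, hb]
      · have hc : cstep v b false = (b, false, 0) := by
          unfold cstep
          rw [if_pos ⟨rfl, hv⟩, if_neg hb]
        rw [hstep, hc, ih]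
        simp [fillF, hz, hb]
    · have hv2 : v ≠ 2 := fun h => hv (Or.inr h)
      have hv0 : v ≠ 0 := fun h => hv (Or.inl h)
      have hc : cstep v b false = (b, false, v) := by
        unfold cstep
        rw [if_neg (by tauto)]
        rw [if_neg hv2]
        by_cases h1 : v = 1
        · rw [if_pos h1]
        · rw [if_neg h1]
      have hzv : zr v = v := by unfold zr; rw [if_neg hv2]
      rw [hstep, hc, ih]
      simp [fillF, hzv, hv0]

theorem scanS_spec : ∀ (col : List Int) (b : Int),
    scanS col b (decide (1 ∈ col)) =
      (col.map zr).take ((topC col + 1).toNat) ++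
        fillF ((col.map zr).drop ((topC col + 1).toNat)) b := by
  intro col
  induction col with
  | nil => intro b; simp [scanS, fillF]
  | cons v vs ih =>
    intro b
    by_cases hv : v = 1
    · subst hv
      have hd : decide ((1:Int) ∈ 1 :: vs) = true := by simp
      rw [hd]
      have hc : cstep 1 b true = (b, false, 1) := by
        unfold cstep
        rw [if_neg (by simp)]
        norm_num
      have hstep : scanS ((1:Int) :: vs) b true =
          (cstep 1 b true).2.2 :: scanS vs (cstep 1 b true).1 (cstep 1 b true).2.1 := rfl
      rw [hstep, hc]
      rw [scanS_false]
      have ht : topC ((1:Int) :: vs) = 0 := by simp [topC]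
      rw [ht]
      have hz1 : zr 1 = 1 := by unfold zr; norm_num
      simp [hz1]
    · by_cases hm : (1:Int) ∈ vs
      · have hd : decide ((1:Int) ∈ v :: vs) = true := by simp [hm]
        rw [hd]
        have hc : cstep v b true = (b, true, zr v) := by
          unfold cstep zr
          rw [if_neg (by simp)]
          rw [if_neg hv]
        have hstep : scanS (v :: vs) b true =
            (cstep v b true).2.2 :: scanS vs (cstep v b true).1 (cstep v b true).2.1 := rfl
        rw [hstep, hc]
        have hds : decide ((1:Int) ∈ vs) = true := by simp [hm]
        rw [← hds, ih b]
        have htvs : topC vs ≠ -1 := fun h => ((topC_neg_iff vs).1 h) hm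
        have hge := topC_ge vs
        have ht : topC (v :: vs) = topC vs + 1 := by
          simp only [topC]
          rw [if_neg hv, if_neg htvs]
        rw [ht]
        have hk : (topC vs + 1 + 1).toNat = (topC vs + 1).toNat + 1 := by omega
        rw [hk]
        simp [List.take_succ_cons, List.drop_succ_cons]
      · have hno : (1:Int) ∉ v :: vs := by simp [hm]; exact fun h => hv h.symm
        have hd : decide ((1:Int) ∈ v :: vs) = false := decide_eq_false hno
        rw [hd, scanS_false]
        have ht : topC (v :: vs) = -1 := (topC_neg_iff (v :: vs)).2 hno
        rw [ht]
        simp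

-- ---------- counting bridge ----------
theorem sum_ind (col : List Int) :
    (col.map (fun v => if v = 2 then (1 : Int) else 0)).sum =
      ((col.countP (fun v => decide (v = 2)) : Nat) : Int) := by
  induction col with
  | nil => simp
  | cons v vs ih =>
    simp only [List.map_cons, List.sum_cons, List.countP_cons, ih]
    by_cases hv : v = 2
    · simp [hv]; push_cast; omega
    · simp [hv]

theorem cnt_eq (grid : List (List Int)) (c : Nat) :
    (((List.range grid.length).filter (fun r => decide (pvCell grid r c = 2))).map
        (fun _ => (1 : Int))).sum =
      (((colP grid c).countP (fun v => decide (v = 2)) : Nat) : Int) := by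
  have h1 : ∀ (l : List Nat), (l.map (fun _ => (1 : Int))).sum = (l.length : Int) := by
    intro l; induction l with
    | nil => simp
    | cons x t ih => simp only [List.map_cons, List.sum_cons, ih, List.length_cons]; push_cast; omega
  rw [h1, ← List.countP_eq_length_filter, colP, List.countP_map]
  norm_cast

-- map over rows at a fixed column = map over the column
theorem map_rows_eq (grid : List (List Int)) (c : Nat) {α : Type} (f : Int → α) :
    grid.map (fun row => f (row.getD c 0)) = (colP grid c).map f := by
  apply List.ext_getElem
  · simp [colP]
  · intro r h1 h2
    have hr : r < grid.length := by simpa using h1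
    rw [List.getElem_map, List.getElem_map, colP_getElem (by simpa [length_colP] using hr)]
    congr 1
    simp [pvCell, List.getD_eq_getElem?_getD, List.getElem?_eq_getElem hr]

theorem any_rows_eq (grid : List (List Int)) (c : Nat) :
    grid.any (fun row => decide (row.getD c 0 = 1)) = decide ((1:Int) ∈ colP grid c) := by
  by_cases hm : (1:Int) ∈ colP grid c
  · rw [decide_eq_true hm, List.any_eq_true]
    have hm' : ∃ r, r < grid.length ∧ pvCell grid r c = 1 := by
      rcases List.mem_map.1 hm with ⟨r, hr, hv⟩
      exact ⟨r, List.mem_range.1 hr, hv⟩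
    rcases hm' with ⟨r, hr, hv⟩
    refine ⟨grid[r], List.getElem_mem hr, ?_⟩
    simp only [decide_eq_true_eq]
    rw [← hv]
    simp [pvCell, List.getD_eq_getElem?_getD, List.getElem?_eq_getElem hr]
  · rw [decide_eq_false hm]
    rw [List.any_eq_false]
    intro row hrow
    simp only [decide_eq_true_eq]
    intro h1
    apply hm
    rcases List.mem_iff_getElem.1 hrow with ⟨r, hr, rfl⟩
    have hc1 : pvCell grid r c = 1 := by
      simpa [pvCell, List.getD_eq_getElem?_getD, List.getElem?_eq_getElem hr] using h1
    rw [colP]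
    exact List.mem_map.2 ⟨r, List.mem_range.2 hr, hc1⟩

-- ---------- A-side: one column step produces specCol ----------
theorem pyfold {b : Type} (F : b → Int → b) (a bb : Int) (ha : 0 ≤ a) (init : b) :
    (PySem.List.pyRange a bb 1).foldl F init =
      ((List.range (bb - a).toNat).map (fun k => a.toNat + k)).foldl
        (fun st (r : Nat) => F st (r : Int)) init := by
  rw [PySem.List.pyRange_one, List.foldl_map, List.foldl_map]
  congr 1
  funext st k
  congr 1
  push_cast
  omega

theorem body_spec (grid : List (List Int)) (w : Nat)
    (hwid : ∀ r, r < grid.length → w ≤ (grid.getD r []).length) (c : Nat) (hcw : c < w)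
    (g : List (List Int)) (hg : Shp grid g) (hcol : colP g c = colP grid c) :
    Shp grid (pvColStep grid g c) ∧
    (∀ c', c' ≠ c → colP (pvColStep grid g c) c' = colP g c') ∧
    colP (pvColStep grid g c) c = specCol (colP grid c) := by
  simp only [pvColStep]
  obtain ⟨Rz, Oz, Cz⟩ := zero_fold grid c w hcw hwid (List.range grid.length) g hg
    (by intro r hr; exact List.mem_range.1 hr)
  have htopb := top_bound grid c (List.range grid.length) (grid.length : Int)
    (by intro r hr; exact_mod_cast List.mem_range.1 hr)
  have hge : -1 ≤ pvTopOne grid c (List.range grid.length) := by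
    rcases htopb with ⟨a, b⟩ | e
    · exact a
    · rw [e]
  have hle : pvTopOne grid c (List.range grid.length) + 1 ≤ (grid.length : Int) := by
    rcases htopb with ⟨a, b⟩ | e
    · omega
    · rw [e]
      have := Int.natCast_nonneg grid.length
      omega
  rw [pyfold _ (pvTopOne grid c (List.range grid.length) + 1) (grid.length : Int) (by omega)]
  simp only [Int.toNat_natCast]
  obtain ⟨Rf, Of, Cf⟩ := fill_fold grid c w hcw hwid
    ((List.range ((grid.length : Int) - (pvTopOne grid c (List.range grid.length) + 1)).toNat).map
      (fun k => (pvTopOne grid c (List.range grid.length) + 1).toNat + k))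
    ((List.range grid.length).foldl (fun o r => if pvCell grid r c = 2 then pvSetCell o r c 0 else o) g)
    ((((List.range grid.length).filter (fun r => decide (pvCell grid r c = 2))).map (fun _ => (1 : Int))).sum)
    Rz
    (by
      intro r hr
      rcases List.mem_map.1 hr with ⟨i, hi, rfl⟩
      have := List.mem_range.1 hi
      omega)
  refine ⟨Rf, fun c' hc' => (Of c' hc').trans (Oz c' hc'), ?_⟩
  rw [Cf, Cz, hcol, cnt_eq grid c]
  simp only [cell_colP grid]
  rw [zero_pure' (colP grid c) grid.length (length_colP grid c)]
  have hm : ((grid.length : Int) - (pvTopOne grid c (List.range grid.length) + 1)).toNat =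
      ((colP grid c).map zr).length - (pvTopOne grid c (List.range grid.length) + 1).toNat := by
    simp [length_colP]; omega
  rw [hm, fillCol_range _ _ _ _ (by simp [length_colP]; omega)]
  rw [specCol, top_eq_topC grid c]

-- ---------- A-side: the outer fold ----------
theorem outer (grid : List (List Int)) (w : Nat)
    (hwid : ∀ r, r < grid.length → w ≤ (grid.getD r []).length) :
    ∀ (cs : List Nat), cs.Nodup → (∀ c ∈ cs, c < w) → ∀ g, Shp grid g →
    (∀ c ∈ cs, colP g c = colP grid c) →
    Shp grid (cs.foldl (pvColStep grid) g) ∧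
    ∀ c', colP (cs.foldl (pvColStep grid) g) c' =
      (if c' ∈ cs then specCol (colP grid c') else colP g c') := by
  intro cs
  induction cs with
  | nil => intro _ _ g hg _; exact ⟨hg, fun c' => by simp⟩
  | cons c cs ih =>
    intro hnd hb g hg hcols
    have hcw : c < w := hb c (List.mem_cons_self ..)
    obtain ⟨R1, O1, C1⟩ := body_spec grid w hwid c hcw g hg (hcols c (List.mem_cons_self ..))
    have hnc : c ∉ cs := by simp at hnd; exact hnd.1
    obtain ⟨R2, C2⟩ := ih (by simp at hnd; exact hnd.2)
      (fun c' hc' => hb c' (List.mem_cons_of_mem _ hc'))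
      (pvColStep grid g c) R1
      (by
        intro c' hc'
        have hne : c' ≠ c := by rintro rfl; exact hnc hc'
        rw [O1 c' hne]; exact hcols c' (List.mem_cons_of_mem _ hc'))
    simp only [List.foldl_cons]
    refine ⟨R2, fun c' => ?_⟩
    rw [C2 c']
    by_cases hc' : c' ∈ cs
    · simp [hc']
    · by_cases hcc : c' = c
      · subst hcc; simp [hc', C1]
      · simp [hc', hcc, O1 c' hcc]

-- ---------- B-side: the inner fold acts per column ----------
-- the body of B's inner fold, named for the proofs (pvInner's fold body, verbatim)
def innStep (row : List Int) (s : List Int × List Bool × List Int) (c : Nat) :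
    List Int × List Bool × List Int :=
  let v := row.getD c 0
  if s.2.1.getD c false = false ∧ (v = 0 ∨ v = 2) then
    if 0 < s.1.getD c 0 then (s.1.set c (s.1.getD c 0 - 1), s.2.1, s.2.2.set c 2)
    else (s.1, s.2.1, s.2.2.set c 0)
  else
    (s.1, (if v = 1 then s.2.1.set c false else s.2.1),
      (if v = 2 then s.2.2.set c 0 else s.2.2))

theorem pvInner_eq_foldl (w : Nat) (row : List Int) (B : List Int) (W : List Bool) :
    pvInner w row B W = (List.range w).foldl (innStep row) (B, W, row.map id) := rfl

theorem inner_spec (row : List Int) : ∀ (cs : List Nat), cs.Nodup →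
    ∀ (B : List Int) (W : List Bool) (nw : List Int),
    (∀ c ∈ cs, c < B.length ∧ c < W.length ∧ c < nw.length ∧ nw.getD c 0 = row.getD c 0) →
    (cs.foldl (innStep row) (B, W, nw)).1.length = B.length ∧
    (cs.foldl (innStep row) (B, W, nw)).2.1.length = W.length ∧
    (cs.foldl (innStep row) (B, W, nw)).2.2.length = nw.length ∧
    (∀ c, c ∉ cs →
      (cs.foldl (innStep row) (B, W, nw)).1.getD c 0 = B.getD c 0 ∧
      (cs.foldl (innStep row) (B, W, nw)).2.1.getD c false = W.getD c false ∧
      (cs.foldl (innStep row) (B, W, nw)).2.2.getD c 0 = nw.getD c 0) ∧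
    (∀ c ∈ cs,
      (cs.foldl (innStep row) (B, W, nw)).1.getD c 0 =
        (cstep (row.getD c 0) (B.getD c 0) (W.getD c false)).1 ∧
      (cs.foldl (innStep row) (B, W, nw)).2.1.getD c false =
        (cstep (row.getD c 0) (B.getD c 0) (W.getD c false)).2.1 ∧
      (cs.foldl (innStep row) (B, W, nw)).2.2.getD c 0 =
        (cstep (row.getD c 0) (B.getD c 0) (W.getD c false)).2.2) := by
  intro cs
  induction cs with
  | nil =>
    intro _ B W nw _
    exact ⟨rfl, rfl, rfl, fun c _ => ⟨rfl, rfl, rfl⟩, fun c hc => absurd hc (by simp)⟩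
  | cons c0 cs ih =>
    intro hnd B W nw hb
    obtain ⟨hB0, hW0, hn0, hval0⟩ := hb c0 (List.mem_cons_self ..)
    have hcs0 : c0 ∉ cs := by simp at hnd; exact hnd.1
    have hnd' : cs.Nodup := by simp at hnd; exact hnd.2
    obtain ⟨hL1, hL2, hL3, hoth, hat1, hat2, hat3⟩ :
        (innStep row (B, W, nw) c0).1.length = B.length ∧
        (innStep row (B, W, nw) c0).2.1.length = W.length ∧
        (innStep row (B, W, nw) c0).2.2.length = nw.length ∧
        (∀ c, c ≠ c0 →
          (innStep row (B, W, nw) c0).1.getD c 0 = B.getD c 0 ∧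
          (innStep row (B, W, nw) c0).2.1.getD c false = W.getD c false ∧
          (innStep row (B, W, nw) c0).2.2.getD c 0 = nw.getD c 0) ∧
        (innStep row (B, W, nw) c0).1.getD c0 0 =
          (cstep (row.getD c0 0) (B.getD c0 0) (W.getD c0 false)).1 ∧
        (innStep row (B, W, nw) c0).2.1.getD c0 false =
          (cstep (row.getD c0 0) (B.getD c0 0) (W.getD c0 false)).2.1 ∧
        (innStep row (B, W, nw) c0).2.2.getD c0 0 =
          (cstep (row.getD c0 0) (B.getD c0 0) (W.getD c0 false)).2.2 := by
      have hin0 : innStep row (B, W, nw) c0 =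
          (if W.getD c0 false = false ∧ (row.getD c0 0 = 0 ∨ row.getD c0 0 = 2) then
             if 0 < B.getD c0 0 then (B.set c0 (B.getD c0 0 - 1), W, nw.set c0 2)
             else (B, W, nw.set c0 0)
           else (B, (if row.getD c0 0 = 1 then W.set c0 false else W),
             (if row.getD c0 0 = 2 then nw.set c0 0 else nw))) := rfl
      have hcs1 : cstep (row.getD c0 0) (B.getD c0 0) (W.getD c0 false) =
          (if W.getD c0 false = false ∧ (row.getD c0 0 = 0 ∨ row.getD c0 0 = 2) then
             if 0 < B.getD c0 0 then (B.getD c0 0 - 1, W.getD c0 false, 2)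
             else (B.getD c0 0, W.getD c0 false, 0)
           else (B.getD c0 0, (if row.getD c0 0 = 1 then false else W.getD c0 false),
             (if row.getD c0 0 = 2 then 0 else row.getD c0 0))) := rfl
      rw [hin0, hcs1]
      by_cases h1 : W.getD c0 false = false ∧ (row.getD c0 0 = 0 ∨ row.getD c0 0 = 2)
      · rw [if_pos h1, if_pos h1]
        by_cases h2 : 0 < B.getD c0 0
        · rw [if_pos h2, if_pos h2]
          refine ⟨by simp, rfl, by simp, ?_, ?_, rfl, ?_⟩
          · intro c hc
            exact ⟨getD_set_ne B (fun h => hc h.symm) _ _, rfl,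
              getD_set_ne nw (fun h => hc h.symm) _ _⟩
          · exact getD_set_self B hB0 _ _
          · exact getD_set_self nw hn0 _ _
        · rw [if_neg h2, if_neg h2]
          refine ⟨rfl, rfl, by simp, ?_, rfl, rfl, ?_⟩
          · intro c hc
            exact ⟨rfl, rfl, getD_set_ne nw (fun h => hc h.symm) _ _⟩
          · exact getD_set_self nw hn0 _ _
      · rw [if_neg h1, if_neg h1]
        refine ⟨rfl, ?_, ?_, ?_, rfl, ?_, ?_⟩
        · show (if row.getD c0 0 = 1 then W.set c0 false else W).length = W.length
          split <;> simp
        · show (if row.getD c0 0 = 2 then nw.set c0 0 else nw).length = nw.length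
          split <;> simp
        · intro c hc
          refine ⟨rfl, ?_, ?_⟩
          · show (if row.getD c0 0 = 1 then W.set c0 false else W).getD c false = W.getD c false
            split
            · exact getD_set_ne W (fun h => hc h.symm) _ _
            · rfl
          · show (if row.getD c0 0 = 2 then nw.set c0 0 else nw).getD c 0 = nw.getD c 0
            split
            · exact getD_set_ne nw (fun h => hc h.symm) _ _
            · rfl
        · show (if row.getD c0 0 = 1 then W.set c0 false else W).getD c0 false =
              (if row.getD c0 0 = 1 then false else W.getD c0 false)
          split
          · exact getD_set_self W hW0 _ _
          · rfl
        · show (if row.getD c0 0 = 2 then nw.set c0 0 else nw).getD c0 0 =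
              (if row.getD c0 0 = 2 then 0 else row.getD c0 0)
          split
          · exact getD_set_self nw hn0 _ _
          · exact hval0
    have hstep : (c0 :: cs).foldl (innStep row) (B, W, nw) =
        cs.foldl (innStep row) (innStep row (B, W, nw) c0) := rfl
    have hprod : innStep row (B, W, nw) c0 =
        ((innStep row (B, W, nw) c0).1,
          (innStep row (B, W, nw) c0).2.1, (innStep row (B, W, nw) c0).2.2) := rfl
    obtain ⟨il1, il2, il3, iout, iin⟩ := ih hnd'
      (innStep row (B, W, nw) c0).1 (innStep row (B, W, nw) c0).2.1 (innStep row (B, W, nw) c0).2.2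
      (by
        intro c hc
        have hne : c ≠ c0 := fun h => hcs0 (h ▸ hc)
        obtain ⟨e1, e2, e3⟩ := hoth c hne
        obtain ⟨b1, b2, b3, _⟩ := hb c (List.mem_cons_of_mem _ hc)
        exact ⟨by omega, by rw [hL2]; exact b2, by omega, by rw [e3]; exact (hb c (List.mem_cons_of_mem _ hc)).2.2.2⟩)
    rw [hstep, hprod]
    refine ⟨by rw [il1, hL1], by rw [il2, hL2], by rw [il3, hL3], ?_, ?_⟩
    · intro c hc
      have hc1 : c ∉ cs := fun h => hc (List.mem_cons_of_mem _ h)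
      have hc0 : c ≠ c0 := fun h => hc (h ▸ List.mem_cons_self ..)
      obtain ⟨o1, o2, o3⟩ := iout c hc1
      obtain ⟨e1, e2, e3⟩ := hoth c hc0
      exact ⟨by rw [o1, e1], by rw [o2, e2], by rw [o3, e3]⟩
    · intro c hc
      rcases List.mem_cons.1 hc with rfl | hm
      · obtain ⟨o1, o2, o3⟩ := iout c hcs0
        exact ⟨by rw [o1, hat1], by rw [o2, hat2], by rw [o3, hat3]⟩
      · obtain ⟨i1, i2, i3⟩ := iin c hm
        have hne : c ≠ c0 := fun h => hcs0 (h ▸ hm)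
        obtain ⟨e1, e2, e3⟩ := hoth c hne
        exact ⟨by rw [i1, e1, e2], by rw [i2, e1, e2], by rw [i3, e1, e2]⟩

-- B's next-state / new-row, per column
def nextB (w : Nat) (row : List Int) (B : List Int) (W : List Bool) : List Int :=
  (List.range w).map (fun c => (cstep (row.getD c 0) (B.getD c 0) (W.getD c false)).1)
def nextW (w : Nat) (row : List Int) (B : List Int) (W : List Bool) : List Bool :=
  (List.range w).map (fun c => (cstep (row.getD c 0) (B.getD c 0) (W.getD c false)).2.1)
def newR (w : Nat) (row : List Int) (B : List Int) (W : List Bool) : List Int :=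
  (List.range w).map (fun c => (cstep (row.getD c 0) (B.getD c 0) (W.getD c false)).2.2) ++ row.drop w

theorem getD_map_range {α : Type} (f : Nat → α) (w c : Nat) (d : α) (hc : c < w) :
    ((List.range w).map f).getD c d = f c := by
  rw [List.getD_eq_getElem?_getD, List.getElem?_map, List.getElem?_range hc]
  rfl

theorem getD_append_lt {α : Type} (l₁ l₂ : List α) (n : Nat) (d : α) (h : n < l₁.length) :
    (l₁ ++ l₂).getD n d = l₁.getD n d := by
  rw [List.getD_eq_getElem?_getD, List.getElem?_append_left h, ← List.getD_eq_getElem?_getD]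

theorem getD_append_ge {α : Type} (l₁ l₂ : List α) (n : Nat) (d : α) (h : l₁.length ≤ n) :
    (l₁ ++ l₂).getD n d = l₂.getD (n - l₁.length) d := by
  rw [List.getD_eq_getElem?_getD, List.getElem?_append_right h, ← List.getD_eq_getElem?_getD]

theorem inner_eq (w : Nat) (row : List Int) (B : List Int) (W : List Bool)
    (hB : B.length = w) (hW : W.length = w) (hrow : w ≤ row.length) :
    pvInner w row B W = (nextB w row B W, nextW w row B W, newR w row B W) := by
  rw [pvInner_eq_foldl, List.map_id]
  obtain ⟨l1, l2, l3, hout, hin⟩ := inner_spec row (List.range w) List.nodup_range B W row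
    (by
      intro c hc
      have hcw := List.mem_range.1 hc
      exact ⟨by omega, by omega, by omega, rfl⟩)
  have e1 : ((List.range w).foldl (innStep row) (B, W, row)).1 = nextB w row B W := by
    apply List.ext_getElem
    · simp [nextB, l1, hB]
    · intro i h1 h2
      have hiw : i < w := by
        rw [l1, hB] at h1; exact h1
      rw [← List.getD_eq_getElem _ 0 h1, (hin i (List.mem_range.2 hiw)).1,
        ← List.getD_eq_getElem _ 0 h2, nextB, getD_map_range _ _ _ _ hiw]
  have e2 : ((List.range w).foldl (innStep row) (B, W, row)).2.1 = nextW w row B W := by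
    apply List.ext_getElem
    · simp [nextW, l2, hW]
    · intro i h1 h2
      have hiw : i < w := by
        rw [l2, hW] at h1; exact h1
      rw [← List.getD_eq_getElem _ false h1, (hin i (List.mem_range.2 hiw)).2.1,
        ← List.getD_eq_getElem _ false h2, nextW, getD_map_range _ _ _ _ hiw]
  have e3 : ((List.range w).foldl (innStep row) (B, W, row)).2.2 = newR w row B W := by
    apply List.ext_getElem
    · simp [newR, l3]
      omega
    · intro i h1 h2
      have hil : i < row.length := by rw [l3] at h1; exact h1
      by_cases hiw : i < w
      · rw [← List.getD_eq_getElem _ 0 h1, (hin i (List.mem_range.2 hiw)).2.2,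
          ← List.getD_eq_getElem _ 0 h2, newR,
          getD_append_lt _ _ _ _ (by simpa using hiw), getD_map_range _ _ _ _ hiw]
      · rw [← List.getD_eq_getElem _ 0 h1, (hout i (by simpa using hiw)).2.2,
          ← List.getD_eq_getElem _ 0 h2, newR,
          getD_append_ge _ _ _ _ (by simpa using (by omega : w ≤ i))]
        simp only [List.length_map, List.length_range]
        rw [List.getD_eq_getElem?_getD, List.getD_eq_getElem?_getD, List.getElem?_drop]
        congr 2
        omega
  calc ((List.range w).foldl (innStep row) (B, W, row))
      = (((List.range w).foldl (innStep row) (B, W, row)).1,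
         ((List.range w).foldl (innStep row) (B, W, row)).2.1,
         ((List.range w).foldl (innStep row) (B, W, row)).2.2) := rfl
    _ = (nextB w row B W, nextW w row B W, newR w row B W) := by rw [e1, e2, e3]

-- the reference row-major recursion
def rowsOut (w : Nat) : List (List Int) → List Int → List Bool → List (List Int)
  | [], _, _ => []
  | row :: rest, B, W => newR w row B W :: rowsOut w rest (nextB w row B W) (nextW w row B W)

theorem outerB (w : Nat) : ∀ (rows : List (List Int)) (B : List Int) (W : List Bool)
    (acc : List (List Int)), B.length = w → W.length = w → (∀ row ∈ rows, w ≤ row.length) →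
    (rows.foldl (pvRowStep w) (B, W, acc)).2.2 = acc ++ rowsOut w rows B W := by
  intro rows
  induction rows with
  | nil => intro B W acc _ _ _; simp [rowsOut]
  | cons row rest ih =>
    intro B W acc hB hW hrows
    rw [List.foldl_cons]
    have hx : pvRowStep w (B, W, acc) row =
        (nextB w row B W, nextW w row B W, acc ++ [newR w row B W]) := by
      unfold pvRowStep
      rw [inner_eq w row B W hB hW (hrows row (List.mem_cons_self ..))]
    rw [hx, ih (nextB w row B W) (nextW w row B W) _ (by simp [nextB]) (by simp [nextW])
      (fun r hr => hrows r (List.mem_cons_of_mem _ hr))]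
    rw [rowsOut]
    simp

-- cells of rowsOut: columns < w follow scanS; columns ≥ w are unchanged
theorem rowsOut_spec (w : Nat) : ∀ (rows : List (List Int)) (B : List Int) (W : List Bool),
    B.length = w → W.length = w → (∀ row ∈ rows, w ≤ row.length) →
    (rowsOut w rows B W).length = rows.length ∧
    (∀ r, ((rowsOut w rows B W).getD r []).length = (rows.getD r []).length) ∧
    (∀ r c, c < w →
      ((rowsOut w rows B W).getD r []).getD c 0 =
        (scanS (rows.map (fun row => row.getD c 0)) (B.getD c 0) (W.getD c false)).getD r 0) ∧
    (∀ r c, w ≤ c →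
      ((rowsOut w rows B W).getD r []).getD c 0 = ((rows.getD r []).getD c 0)) := by
  intro rows
  induction rows with
  | nil =>
    intro B W _ _ _
    exact ⟨rfl, fun r => rfl, fun r c hc => by simp [rowsOut, scanS], fun r c hc => rfl⟩
  | cons row rest ih =>
    intro B W hB hW hrows
    have hwr : w ≤ row.length := hrows row (List.mem_cons_self ..)
    obtain ⟨jL, jRL, jC, jR⟩ := ih (nextB w row B W) (nextW w row B W)
      (by simp [nextB]) (by simp [nextW]) (fun r hr => hrows r (List.mem_cons_of_mem _ hr))
    refine ⟨by simp [rowsOut, jL], ?_, ?_, ?_⟩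
    · intro r
      cases r with
      | zero =>
        simp only [rowsOut, List.getD_cons_zero]
        simp [newR]
        omega
      | succ r =>
        simp only [rowsOut, List.getD_cons_succ]
        exact jRL r
    · intro r c hc
      cases r with
      | zero =>
        simp only [rowsOut, List.getD_cons_zero, List.map_cons]
        rw [newR, getD_append_lt _ _ _ _ (by simpa using hc), getD_map_range _ _ _ _ hc]
        have : scanS ((row.getD c 0) :: rest.map (fun row => row.getD c 0)) (B.getD c 0) (W.getD c false) =
            (cstep (row.getD c 0) (B.getD c 0) (W.getD c false)).2.2 ::
              scanS (rest.map (fun row => row.getD c 0))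
                (cstep (row.getD c 0) (B.getD c 0) (W.getD c false)).1
                (cstep (row.getD c 0) (B.getD c 0) (W.getD c false)).2.1 := rfl
        rw [this, List.getD_cons_zero]
      | succ r =>
        simp only [rowsOut, List.getD_cons_succ, List.map_cons]
        rw [jC r c hc]
        have : scanS ((row.getD c 0) :: rest.map (fun row => row.getD c 0)) (B.getD c 0) (W.getD c false) =
            (cstep (row.getD c 0) (B.getD c 0) (W.getD c false)).2.2 ::
              scanS (rest.map (fun row => row.getD c 0))
                (cstep (row.getD c 0) (B.getD c 0) (W.getD c false)).1
                (cstep (row.getD c 0) (B.getD c 0) (W.getD c false)).2.1 := rfl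
        rw [this, List.getD_cons_succ]
        rw [nextB, getD_map_range _ _ _ _ hc, nextW, getD_map_range _ _ _ _ hc]
    · intro r c hc
      cases r with
      | zero =>
        simp only [rowsOut, List.getD_cons_zero]
        rw [newR, getD_append_ge _ _ _ _ (by simpa using hc)]
        simp only [List.length_map, List.length_range]
        rw [List.getD_eq_getElem?_getD, List.getElem?_drop, List.getD_eq_getElem?_getD]
        congr 2
        omega
      | succ r =>
        simp only [rowsOut, List.getD_cons_succ]
        exact jR r c hc

-- ---------- final glue ----------
theorem main_equiv (grid : List (List Int))
    (hpre : ∀ row ∈ grid, (grid.getD 0 []).length ≤ row.length) :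
    transform grid = transform_alt grid := by
  by_cases hnil : grid.length = 0
  · have : grid = [] := List.length_eq_zero_iff.1 hnil
    subst this
    rfl
  · have hwid : ∀ r, r < grid.length → (grid.getD 0 []).length ≤ (grid.getD r []).length := by
      intro r hr
      have hm : grid.getD r [] ∈ grid := by
        rw [List.getD_eq_getElem _ _ hr]; exact List.getElem_mem _
      exact hpre _ hm
    have hrows : ∀ row ∈ grid, (grid.getD 0 []).length ≤ row.length := hpre
    have htr : transform grid = (List.range (grid.getD 0 []).length).foldl (pvColStep grid) grid := by
      simp only [transform]
      rw [if_pos hnil]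
      congr 1
      simp
    obtain ⟨RT, CT⟩ := outer grid (grid.getD 0 []).length hwid
      (List.range (grid.getD 0 []).length) List.nodup_range
      (fun c hc => List.mem_range.1 hc) grid ⟨rfl, fun _ => rfl⟩ (fun _ _ => rfl)
    rw [← htr] at RT CT
    -- B side
    have hBlen : ((List.range (grid.getD 0 []).length).map
        (fun c => (grid.map (fun row => if row.getD c 0 = 2 then (1 : Int) else 0)).sum)).length =
        (grid.getD 0 []).length := by simp
    have hWlen : ((List.range (grid.getD 0 []).length).map
        (fun c => grid.any (fun row => decide (row.getD c 0 = 1)))).length =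
        (grid.getD 0 []).length := by simp
    have halt : transform_alt grid =
        rowsOut (grid.getD 0 []).length grid
          ((List.range (grid.getD 0 []).length).map
            (fun c => (grid.map (fun row => if row.getD c 0 = 2 then (1 : Int) else 0)).sum))
          ((List.range (grid.getD 0 []).length).map
            (fun c => grid.any (fun row => decide (row.getD c 0 = 1)))) := by
      simp only [transform_alt]
      rw [if_neg hnil]
      rw [outerB (grid.getD 0 []).length grid _ _ [] hBlen hWlen hrows]
      rfl
    obtain ⟨sL, sRL, sC, sR⟩ := rowsOut_spec (grid.getD 0 []).length grid _ _ hBlen hWlen hrows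
    rw [← halt] at sL sRL sC sR
    -- per-column value of B's cells, c < w
    have hcellB : ∀ r c, c < (grid.getD 0 []).length →
        ((transform_alt grid).getD r []).getD c 0 = (specCol (colP grid c)).getD r 0 := by
      intro r c hc
      rw [sC r c hc]
      have hcolmap : grid.map (fun row => row.getD c 0) = colP grid c := by
        have := map_rows_eq grid c (fun v => v)
        simpa using this
      have hbud : ((List.range (grid.getD 0 []).length).map
          (fun c => (grid.map (fun row => if row.getD c 0 = 2 then (1 : Int) else 0)).sum)).getD c 0 =
          (((colP grid c).countP (fun v => decide (v = 2)) : Nat) : Int) := by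
        rw [getD_map_range _ _ _ _ hc, map_rows_eq grid c (fun v => if v = 2 then (1 : Int) else 0),
          sum_ind]
      have hwt : ((List.range (grid.getD 0 []).length).map
          (fun c => grid.any (fun row => decide (row.getD c 0 = 1)))).getD c false =
          decide ((1:Int) ∈ colP grid c) := by
        rw [getD_map_range _ _ _ _ hc, any_rows_eq]
      rw [hcolmap, hbud, hwt, scanS_spec]
      rfl
    -- assemble
    apply List.ext_getElem
    · rw [RT.1, sL]
    · intro r h1 h2
      have hr : r < grid.length := by rw [RT.1] at h1; exact h1
      have hAr : (transform grid)[r] = (transform grid).getD r [] := (List.getD_eq_getElem _ _ h1).symm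
      have hBr : (transform_alt grid)[r] = (transform_alt grid).getD r [] := (List.getD_eq_getElem _ _ h2).symm
      rw [hAr, hBr]
      apply List.ext_getElem
      · rw [RT.2 r, sRL r]
      · intro c h3 h4
        have hcl : c < (grid.getD r []).length := by rw [RT.2 r] at h3; exact h3
        rw [← List.getD_eq_getElem _ 0 h3, ← List.getD_eq_getElem _ 0 h4]
        have hA : ((transform grid).getD r []).getD c 0 = (colP (transform grid) c).getD r 0 := by
          rw [← cell_colP]
          rfl
        rw [hA, CT c]
        by_cases hcw : c < (grid.getD 0 []).length
        · rw [if_pos (List.mem_range.2 hcw), hcellB r c hcw]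
        · rw [if_neg (by simpa using hcw), sR r c (by omega), ← cell_colP]
          rfl

-- ===== VERDICT (by name: the statement is the Claim_ definition above) =====
theorem transform_spec : Claim_equal_transform := by
  unfold Claim_equal_transform
  intro grid _ hpre
  unfold Spec_transform
  exact main_equiv grid hpre
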